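-- pv_equiv track=rewrite | github.com/3-24/id0-rsa.pub | 45_RSA_Modulus_Factorization/solve.py | remove_even
-- ===== SOURCE A (Python) =====
-- def remove_even(n):
--     if n == 0:
--         return (0,0)
--     r = n
--     t = 0
--     while (r & 1) == 0:
--         t+=1
--         r>>=1
--     return (r,t)
-- ===== SOURCE B (Python) =====
-- def remove_even(n):
--     if n == 0:
--         return (0, 0)
--     t = (n & -n).bit_length() - 1
--     return (n >> t, t)
-- ===== Notes on version B (the rewrite author's own statement) =====
-- stated objective: faster
-- what changed: The while loop that halves n repeatedly is replaced by the loop-free lowest-set-bit idiom: t = (n & -n).bit_length() - 1 and r = n >> t.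
import Mathlib
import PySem

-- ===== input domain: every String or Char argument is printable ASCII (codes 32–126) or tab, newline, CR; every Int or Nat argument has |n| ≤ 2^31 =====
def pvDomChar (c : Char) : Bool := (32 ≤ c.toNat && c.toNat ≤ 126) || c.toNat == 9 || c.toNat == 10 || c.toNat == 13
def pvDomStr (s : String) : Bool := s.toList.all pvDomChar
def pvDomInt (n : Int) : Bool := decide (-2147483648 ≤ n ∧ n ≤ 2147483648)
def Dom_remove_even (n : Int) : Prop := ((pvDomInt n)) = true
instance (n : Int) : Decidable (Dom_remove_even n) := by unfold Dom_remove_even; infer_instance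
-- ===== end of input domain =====

-- B replaces A's halving loop by the loop-free lowest-set-bit idiom (n & -n).bit_length() - 1.

-- ===== PORT A =====
-- A's while loop: 'while (r & 1) == 0: t += 1; r >>= 1'.  The conjunct 'r ≠ 0' is a
-- totality guard only: the loop is never entered with r = 0 (A checks n ≠ 0 first, and
-- halving an even nonzero r never yields 0; Python would diverge at r = 0).
def removeEvenLoop (r t : Int) : Int × Int :=
  if h : PySem.Int.band r 1 = 0 ∧ r ≠ 0 then
    removeEvenLoop (r >>> (1:Nat)) (t + 1)
  else
    (r, t)
termination_by r.natAbs
decreasing_by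
  obtain ⟨h0, hne⟩ := h
  rw [PySem.Int.band_one, PySem.Int.mod_eq_zero_iff_dvd] at h0
  obtain ⟨c, rfl⟩ := h0
  have h1 : (2 * c) >>> (1:Nat) = c := by
    rw [Int.shiftRight_eq_div_pow]
    simpa using Int.mul_ediv_cancel_left c (two_ne_zero)
  rw [h1]
  omega

def remove_even (n : Int) : Int × Int :=
  if n = 0 then (0, 0)
  else removeEvenLoop n 0

-- ===== PORT B =====
def remove_even_alt (n : Int) : Int × Int :=
  if n = 0 then (0, 0)
  else
    let t : Nat := PySem.Int.bitLength (PySem.Int.band n (-n)) - 1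
    (n >>> t, (t : Int))

-- ===== PRECONDITION & SPEC =====
def Spec_remove_even (n : Int) (out : Int × Int) : Prop := out = remove_even_alt n
instance (n : Int) (out : Int × Int) : Decidable (Spec_remove_even n out) := by unfold Spec_remove_even; infer_instance

-- ===== CLAIM (what is proved, stated in full; the proofs are below) =====
def Claim_equal_remove_even : Prop := ∀ (n : Int), Dom_remove_even n → Spec_remove_even n (remove_even n)

-- ===== LEMMAS AND PROOFS =====

-- bit recursion for Nat &&&
theorem land_even_odd (a b : Nat) : (2*a) &&& (2*b+1) = 2*(a &&& b) := by
  have := Nat.bitwise_bit (f := and) rfl false a true b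
  simpa [Nat.bit, HAnd.hAnd, AndOp.and, Nat.land, two_mul, Nat.mul_comm] using this

theorem land_odd_even (a b : Nat) : (2*a+1) &&& (2*b) = 2*(a &&& b) := by
  have := Nat.bitwise_bit (f := and) rfl true a false b
  simpa [Nat.bit, HAnd.hAnd, AndOp.and, Nat.land, two_mul, Nat.mul_comm] using this

-- the lowest-set-bit identity on Nat: N - (N &&& (N-1)) has N = 2^k * M, M odd
theorem land_pred (k M : Nat) (hM : M % 2 = 1) :
    (2^k * M) &&& (2^k * M - 1) = 2^k * M - 2^k := by
  induction k with
  | zero =>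
    obtain ⟨a, rfl⟩ : ∃ a, M = 2*a+1 := ⟨M/2, by omega⟩
    have h : (2*a+1) &&& (2*a) = 2*(a &&& a) := land_odd_even a a
    simpa using h
  | succ k ih =>
    have hM1 : 0 < M := by omega
    have hP : 0 < 2^k * M := by positivity
    have h1 : 2^(k+1) * M = 2 * (2^k * M) := by ring
    rw [h1]
    have h2 : 2 * (2^k * M) - 1 = 2 * (2^k * M - 1) + 1 := by omega
    rw [h2, land_even_odd, ih]
    have := Nat.one_le_two_pow (n := k)
    have hle : 2^k ≤ 2^k * M := Nat.le_mul_of_pos_right (2^k) (show 0 < M by omega)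
    omega

-- PySem.Int.band n (-n) in terms of natAbs
theorem band_neg_self (n : Int) (hn : n ≠ 0) :
    PySem.Int.band n (-n) = ((n.natAbs - (n.natAbs &&& (n.natAbs - 1)) : Nat) : Int) := by
  unfold PySem.Int.band
  rcases lt_trichotomy n 0 with h | h | h
  · have h1 : ¬ (0 ≤ n) := by omega
    have h2 : (0:Int) ≤ -n := by omega
    simp only [h1, if_false, h2, if_true]
    have e1 : (-n).toNat = n.natAbs := by omega
    have e2 : (-n - 1).toNat = n.natAbs - 1 := by omega
    rw [e1, e2]
  · exact absurd h hn
  · have h1 : (0:Int) ≤ n := by omega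
    have h2 : ¬ ((0:Int) ≤ -n) := by omega
    simp only [h1, if_true, h2, if_false]
    have e1 : n.toNat = n.natAbs := by omega
    have e2 : (-(-n) - 1).toNat = n.natAbs - 1 := by omega
    rw [e1, e2]

theorem band_neg_self_pow (n : Int) (k : Nat) (M : Nat) (hM : M % 2 = 1)
    (hN : n.natAbs = 2^k * M) (hn : n ≠ 0) :
    PySem.Int.band n (-n) = ((2^k : Nat) : Int) := by
  rw [band_neg_self n hn, hN, land_pred k M hM]
  have hle : 2^k ≤ 2^k * M := Nat.le_mul_of_pos_right (2^k) (show 0 < M by omega)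
  have h3 : ∀ (P Q : Nat), P ≤ Q → Q - (Q - P) = P := by intro P Q h; omega
  rw [h3 _ _ hle]

-- bit_length of a power of two is k+1
theorem bitLength_two_pow (k : Nat) :
    PySem.Int.bitLength ((2^k : Nat) : Int) = k + 1 := by
  induction k with
  | zero => decide
  | succ k ih =>
    have h := PySem.Int.bitLength_natCast (m := 2^(k+1)) (by positivity)
    rw [h]
    have h2 : 2^(k+1) / 2 = 2^k := by
      rw [pow_succ]
      exact Nat.mul_div_cancel _ (by norm_num)
    rw [h2, ih]

-- A's loop on m * 2^k with m odd
theorem loop_eq (m : Int) (hm : ¬ (2:Int) ∣ m) (k : Nat) (t : Int) :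
    removeEvenLoop (m * 2^k) t = (m, t + k) := by
  induction k generalizing t with
  | zero =>
    rw [removeEvenLoop]
    have hb : PySem.Int.band (m * 2^0) 1 ≠ 0 := by
      rw [PySem.Int.band_one]
      intro hz
      exact hm (by simpa using (PySem.Int.mod_eq_zero_iff_dvd _ 2).mp hz)
    rw [dif_neg (by tauto)]
    simp
  | succ k ih =>
    rw [removeEvenLoop]
    have hm0 : m ≠ 0 := by rintro rfl; exact hm ⟨0, by ring⟩
    have hdvd : (2:Int) ∣ m * 2^(k+1) := ⟨m * 2^k, by ring⟩
    have hb : PySem.Int.band (m * 2^(k+1)) 1 = 0 := by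
      rw [PySem.Int.band_one, PySem.Int.mod_eq_zero_iff_dvd]; exact hdvd
    have hne : m * 2^(k+1) ≠ 0 := by
      intro h
      rcases mul_eq_zero.mp h with h | h
      · exact hm0 h
      · exact absurd h (by positivity)
    rw [dif_pos ⟨hb, hne⟩]
    have hsh : (m * 2^(k+1)) >>> (1:Nat) = m * 2^k := by
      rw [Int.shiftRight_eq_div_pow]
      have : m * 2^(k+1) = (m * 2^k) * 2 := by ring
      rw [this]
      simpa using Int.mul_ediv_cancel (m * 2^k) (two_ne_zero)
    rw [hsh, ih]
    congr 1
    push_cast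
    ring

-- ===== VERDICT (by name: the statement is the Claim_ definition above) =====
theorem remove_even_spec : Claim_equal_remove_even := by
  intro n _
  unfold Spec_remove_even remove_even remove_even_alt
  by_cases hn : n = 0
  · simp [hn]
  · rw [if_neg hn, if_neg hn]
    obtain ⟨k, M, hM, hN⟩ := Nat.exists_eq_pow_mul_and_not_dvd (n := n.natAbs)
      (by simpa using hn) 2 (by norm_num)
    have hModd : M % 2 = 1 := by omega
    -- the odd integer cofactor m with n = m * 2^k
    have hrep : ∃ m : Int, n = m * 2^k ∧ ¬ (2:Int) ∣ m := by
      rcases le_or_gt 0 n with h | h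
      · refine ⟨(M : Int), ?_, ?_⟩
        · have : n = (n.natAbs : Int) := by omega
          rw [this, hN]; push_cast; ring
        · rw [Int.ofNat_dvd_right]; simpa using hM
      · refine ⟨-(M : Int), ?_, ?_⟩
        · have : n = -(n.natAbs : Int) := by omega
          rw [this, hN]; push_cast; ring
        · rw [dvd_neg, Int.ofNat_dvd_right]; simpa using hM
    obtain ⟨m, hnm, hmodd⟩ := hrep
    have hA : removeEvenLoop n 0 = (m, (k : Int)) := by
      rw [hnm, loop_eq m hmodd k 0, zero_add]
    have hband := band_neg_self_pow n k M hModd (by rw [hN]) hn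
    have hsh : n >>> (k : Nat) = m := by
      rw [Int.shiftRight_eq_div_pow, hnm]
      exact_mod_cast Int.mul_ediv_cancel m (by positivity : ((2^k : Nat) : Int) ≠ 0)
    rw [hA]
    simp only [hband, bitLength_two_pow k, Nat.add_sub_cancel, hsh]
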